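-- pv_equiv track=rewrite | github.com/khangnguyen1604/DP-DIGIT | CODE/T4001/T4001.py | digit_dp
-- ===== SOURCE A (Python) =====
-- def digit_dp(pos, tight, sum_digits, digits, dp, prime):
--     if pos == len(digits):
--         return 1 if prime[sum_digits] else 0
--     if not tight and dp[pos][sum_digits] != -1:
--         return dp[pos][sum_digits]
--
--     limit = digits[pos] if tight else 9
--     count = 0
--     for i in range(limit + 1):
--         new_tight = tight and (i == digits[pos])
--         count += digit_dp(pos + 1, new_tight, sum_digits + i, digits, dp, prime)
--
--     if not tight:
--         dp[pos][sum_digits] = count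
--
--     return count
-- ===== SOURCE B (Python) =====
-- def digit_dp(pos, tight, sum_digits, digits, dp, prime):
--     # Iterative forward digit DP; reads dp as a memo but never mutates it
--     # (A writes back into dp; the return value is the same).
--     n = len(digits)
--     free = {}               # partial digit-sum -> number of non-tight prefixes reaching it
--     ts = sum_digits         # digit-sum along the (single) tight prefix, used only if tight
--     if not tight:
--         free[sum_digits] = 1
--     result = 0
--     for p in range(pos, n):
--         new_free = {}
--         for s, m in free.items():
--             c = dp[p][s]
--             if c != -1:
--                 result += m * c
--             else:
--                 for i in range(10):
--                     new_free[s + i] = new_free.get(s + i, 0) + m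
--         if tight:
--             d = digits[p]
--             for i in range(d):
--                 new_free[ts + i] = new_free.get(ts + i, 0) + 1
--             ts += d
--         free = new_free
--     for s, m in free.items():
--         if prime[s]:
--             result += m
--     if tight:
--         result += 1 if prime[ts] else 0
--     return result
-- ===== Notes on version B (the rewrite author's own statement) =====
-- stated objective: alternative
-- what changed: Replaces A's top-down memoized recursion (which writes completion counts back into dp) by a single forward loop over positions that maintains a counter dict of reachable partial digit-sums for non-tight prefixes plus the one tight path, consuming dp's memo entries read-only and never mutating dp (return value only; A mutates dp in place).
-- outside the precondition, e.g. on digit_dp(2, False, 0, [1], [[], [], [9]], [True]): A returns 9, B returns 1; on digit_dp(0, True, 0, [-2], [[]], [True]): A returns 0, B raises IndexError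
import Mathlib
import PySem

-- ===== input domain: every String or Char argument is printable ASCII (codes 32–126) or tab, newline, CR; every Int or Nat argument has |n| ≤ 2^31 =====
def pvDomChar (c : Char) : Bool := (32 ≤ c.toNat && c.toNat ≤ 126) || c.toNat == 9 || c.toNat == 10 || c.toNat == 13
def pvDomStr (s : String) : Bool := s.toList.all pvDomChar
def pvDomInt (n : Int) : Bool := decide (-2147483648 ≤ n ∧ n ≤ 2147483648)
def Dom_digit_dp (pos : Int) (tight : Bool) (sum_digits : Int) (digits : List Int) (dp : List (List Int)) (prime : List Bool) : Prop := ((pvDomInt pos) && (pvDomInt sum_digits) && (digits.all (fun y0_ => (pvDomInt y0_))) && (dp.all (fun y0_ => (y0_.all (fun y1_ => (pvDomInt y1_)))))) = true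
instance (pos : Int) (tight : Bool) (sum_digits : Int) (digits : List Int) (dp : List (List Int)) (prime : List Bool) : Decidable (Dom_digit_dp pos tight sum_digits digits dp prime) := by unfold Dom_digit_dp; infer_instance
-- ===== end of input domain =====

-- B replaces A's memoized top-down recursion by one forward loop over positions keeping a dict of
-- reachable partial digit-sums (reading dp's memo entries, never writing them); return-value
-- equivalence only: A mutates dp in place, B does not.


-- ===== PORT A =====
-- dp[p][s] = v for the nonnegative in-range indices Pre_ admits (Python raises or wraps elsewhere)
def pvSet2 (dp : List (List Int)) (p s v : Int) : List (List Int) :=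
  if 0 ≤ p ∧ 0 ≤ s then dp.set p.toNat ((dp.getD p.toNat []).set s.toNat v) else dp

-- A's recursion, threading the mutated memo dp; the fuel only makes the recursion total
-- (inside Pre_ the fuel digits.length + 1 is never exhausted); where Python raises
-- (pyGet? = none) the port returns a junk value — such inputs are outside Pre_.
def pvGoA (fuel : Nat) (pos : Int) (tight : Bool) (s : Int) (digits : List Int) (dp : List (List Int)) (prime : List Bool) : Int × List (List Int) :=
  match fuel with
  | 0 => (0, dp)
  | fuel + 1 =>
    if pos = (digits.length : Int) then
      ((match PySem.List.pyGet? prime s with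
        | some b => if b then 1 else 0
        | none => 0), dp)
    else
      let cached : Option Int :=
        if tight then none else
          match (PySem.List.pyGet? dp pos).bind (fun row => PySem.List.pyGet? row s) with
          | none => some 0      -- IndexError in Python; outside Pre_
          | some v => if v ≠ -1 then some v else none
      match cached with
      | some v => (v, dp)
      | none =>
        let d := (PySem.List.pyGet? digits pos).getD 0   -- in range whenever Pre_ holds
        let limit : Int := if tight then d else 9
        let r := (PySem.List.pyRange 0 (limit + 1) 1).foldl
          (fun (acc : Int × List (List Int)) i =>
            let t := pvGoA fuel (pos + 1) (tight && (i == d)) (s + i) digits acc.2 prime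
            (acc.1 + t.1, t.2)) (0, dp)
        if tight then r else (r.1, pvSet2 r.2 pos s r.1)

def digit_dp (pos : Int) (tight : Bool) (sum_digits : Int) (digits : List Int) (dp : List (List Int)) (prime : List Bool) : Int :=
  (pvGoA (digits.length + 1) pos tight sum_digits digits dp prime).1

-- ===== PORT B =====
-- forward loop: free = dict (partial digit-sum -> multiplicity of non-tight prefixes), ts = tight-path sum
-- body of "for s, m in free.items()"
def pvInnerB (dp : List (List Int)) (p : Int) (acc : Int × PySem.Dict Int Int) (sm : Int × Int) : Int × PySem.Dict Int Int :=
  let c := ((PySem.List.pyGet? dp p).bind (fun row => PySem.List.pyGet? row sm.1)).getD 0  -- in range whenever Pre_ holds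
  if c ≠ -1 then (acc.1 + sm.2 * c, acc.2)
  else (acc.1, (PySem.List.pyRange 0 10 1).foldl
        (fun nf i => nf.insert (sm.1 + i) (nf.getD (sm.1 + i) 0 + sm.2)) acc.2)

-- body of "for p in range(pos, n)"; state (result, free, ts)
def pvOuterB (tight : Bool) (digits : List Int) (dp : List (List Int)) (st : Int × PySem.Dict Int Int × Int) (p : Int) : Int × PySem.Dict Int Int × Int :=
  let step := st.2.1.items.foldl (pvInnerB dp p) (st.1, PySem.Dict.empty)
  if tight then
    let d := (PySem.List.pyGet? digits p).getD 0   -- in range whenever Pre_ holds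
    (step.1, (PySem.List.pyRange 0 d 1).foldl
      (fun nf i => nf.insert (st.2.2 + i) (nf.getD (st.2.2 + i) 0 + 1)) step.2, st.2.2 + d)
  else (step.1, step.2, st.2.2)

-- the two final "harvest" loops
def pvFinishB (tight : Bool) (prime : List Bool) (st : Int × PySem.Dict Int Int × Int) : Int :=
  let result := st.2.1.items.foldl
    (fun acc sm => if (PySem.List.pyGet? prime sm.1).getD false then acc + sm.2 else acc) st.1
  if tight then result + (if (PySem.List.pyGet? prime st.2.2).getD false then 1 else 0) else result

def digit_dp_alt (pos : Int) (tight : Bool) (sum_digits : Int) (digits : List Int) (dp : List (List Int)) (prime : List Bool) : Int :=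
  let free0 : PySem.Dict Int Int :=
    if tight then PySem.Dict.empty else PySem.Dict.empty.insert sum_digits 1
  pvFinishB tight prime
    ((PySem.List.pyRange pos (digits.length : Int) 1).foldl (pvOuterB tight digits dp)
      (0, free0, sum_digits))

-- ===== PRECONDITION & SPEC =====
-- Pre_ covers (1) the terminal position pos = len(digits) with sum_digits an index prime
-- accepts; (2) an immediate memo hit (pos < len(digits), not tight, dp[pos][sum_digits]
-- exists and is not -1), on which both programs return that entry; (3) the natural
-- digit-DP domain: 0 ≤ pos ≤ len(digits), digits are decimal digits,
-- 0 ≤ sum_digits, and prime / the dp rows long enough for every reachable digit-sum.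
-- It excludes inputs where Python indexing raises or wraps around (negative pos, pos past the
-- end, negative digit-sums) and, narrowing, some inputs where A returns a value only through
-- such accidental wraparound or out-of-range digits (see the cites in the claim).
def Pre_digit_dp (pos : Int) (tight : Bool) (sum_digits : Int) (digits : List Int) (dp : List (List Int)) (prime : List Bool) : Prop :=
  (pos = (digits.length : Int) ∧ PySem.Raise.InRange prime.length sum_digits) ∨
  (pos < (digits.length : Int) ∧ tight = false ∧
    ((PySem.List.pyGet? dp pos).bind fun row => PySem.List.pyGet? row sum_digits) ≠ none ∧
    ((PySem.List.pyGet? dp pos).bind fun row => PySem.List.pyGet? row sum_digits) ≠ some (-1)) ∨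
  (0 ≤ pos ∧ pos ≤ (digits.length : Int) ∧ 0 ≤ sum_digits ∧
   (∀ d ∈ digits, 0 ≤ d ∧ d ≤ 9) ∧
   sum_digits + 9 * ((digits.length : Int) - pos) < (prime.length : Int) ∧
   (pos < (digits.length : Int) →
     (digits.length : Int) ≤ (dp.length : Int) ∧
     ∀ row ∈ dp, sum_digits + 9 * ((digits.length : Int) - pos) < (row.length : Int)))
instance (pos : Int) (tight : Bool) (sum_digits : Int) (digits : List Int) (dp : List (List Int)) (prime : List Bool) : Decidable (Pre_digit_dp pos tight sum_digits digits dp prime) := by unfold Pre_digit_dp; infer_instance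

def pvWitness_digit_dp : Int × Bool × Int × List Int × List (List Int) × List Bool :=
  (0, true, 0, [1, 0], [List.replicate 19 (-1), List.replicate 19 (-1)], List.replicate 19 true)

def Spec_digit_dp (pos : Int) (tight : Bool) (sum_digits : Int) (digits : List Int) (dp : List (List Int)) (prime : List Bool) (out : Int) : Prop := out = digit_dp_alt pos tight sum_digits digits dp prime
instance (pos : Int) (tight : Bool) (sum_digits : Int) (digits : List Int) (dp : List (List Int)) (prime : List Bool) (out : Int) : Decidable (Spec_digit_dp pos tight sum_digits digits dp prime out) := by unfold Spec_digit_dp; infer_instance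

-- ===== CLAIM (what is proved, stated in full; the proofs are below) =====
def Claim_equal_digit_dp : Prop := ∀ (pos : Int) (tight : Bool) (sum_digits : Int) (digits : List Int) (dp : List (List Int)) (prime : List Bool), Dom_digit_dp pos tight sum_digits digits dp prime → Pre_digit_dp pos tight sum_digits digits dp prime → Spec_digit_dp pos tight sum_digits digits dp prime (digit_dp pos tight sum_digits digits dp prime)

-- ===== LEMMAS AND PROOFS =====

-- memo cell dp[p][s] as a total function
def pvCell (dp : List (List Int)) (p sN : Nat) : Int := (dp.getD p []).getD sN 0

-- the pure completion count both ports compute, reading memo hits from the ORIGINAL dp0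
-- (fuel k = digits.length - p)
def pvF (digits : List Int) (dp0 : List (List Int)) (prime : List Bool) : Nat → Nat → Bool → Int → Int
  | 0, _, _, s => if prime.getD s.toNat false then 1 else 0
  | (k + 1), p, tight, s =>
    let c := pvCell dp0 p s.toNat
    if tight = false ∧ c ≠ -1 then c
    else
      let d := digits.getD p 0
      let limit : Int := if tight then d else 9
      (PySem.List.pyRange 0 (limit + 1) 1).foldl
        (fun acc i => acc + pvF digits dp0 prime k (p + 1) (tight && (i == d)) (s + i)) 0

-- weight of a multiplicity list: Σ m · g s
def pvWt (g : Int → Int) (l : List (Int × Int)) : Int := (l.map (fun sm => sm.2 * g sm.1)).sum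

-- A's evolving memo agrees with dp0 except that -1 cells may have been filled with pvF values
def pvConsist (digits : List Int) (dp0 : List (List Int)) (prime : List Bool) (dp : List (List Int)) : Prop :=
  dp.length = dp0.length ∧ (∀ j : Nat, (dp.getD j []).length = (dp0.getD j []).length) ∧
  ∀ (p sN : Nat), pvCell dp p sN = pvCell dp0 p sN ∨
    (pvCell dp0 p sN = -1 ∧
     pvCell dp p sN = pvF digits dp0 prime (digits.length - p) p false (sN : Int))

lemma pvFoldl_add_sum {α : Type} (f : α → Int) (l : List α) :
    ∀ (init : Int), l.foldl (fun a x => a + f x) init = init + (l.map f).sum := by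
  induction l with
  | nil => intro init; simp
  | cons x t ih => intro init; simp [ih]; ring

lemma pvRead_eq (dp : List (List Int)) (p : Nat) (s : Int) (hp : p < dp.length)
    (hs : 0 ≤ s) (hsl : s.toNat < (dp.getD p []).length) :
    ((PySem.List.pyGet? dp (p : Int)).bind fun row => PySem.List.pyGet? row s)
      = some (pvCell dp p s.toNat) := by
  have h1 : PySem.List.pyGet? dp (p : Int) = some (dp.getD p []) := by
    rw [PySem.List.pyGet?_natCast, List.getElem?_eq_getElem hp, List.getD_eq_getElem dp [] hp]
  rw [h1]
  show PySem.List.pyGet? (dp.getD p []) s = _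
  rw [PySem.List.pyGet?_eq_some_getElem _ hs (by omega)]
  unfold pvCell
  rw [List.getD_eq_getElem _ _ hsl]

lemma pvPrimeRead (prime : List Bool) (s : Int) (hs : 0 ≤ s) (h : s.toNat < prime.length) :
    (PySem.List.pyGet? prime s).getD false = prime.getD s.toNat false := by
  rw [PySem.List.pyGet?_eq_some_getElem _ hs (by omega), List.getD_eq_getElem _ _ h]
  rfl

-- pvF unfoldings
lemma pvF_cache_eq (digits : List Int) (dp0 : List (List Int)) (prime : List Bool)
    (k p : Nat) (s : Int) (h : pvCell dp0 p s.toNat ≠ -1) :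
    pvF digits dp0 prime (k + 1) p false s = pvCell dp0 p s.toNat := by
  simp [pvF, h]

lemma pvF_succ_eq (digits : List Int) (dp0 : List (List Int)) (prime : List Bool)
    (k p : Nat) (tight : Bool) (s : Int) :
    pvF digits dp0 prime (k + 1) p tight s
      = if tight = false ∧ pvCell dp0 p s.toNat ≠ -1 then pvCell dp0 p s.toNat
        else
          (PySem.List.pyRange 0 ((if tight then digits.getD p 0 else 9) + 1) 1).foldl
            (fun acc i => acc + pvF digits dp0 prime k (p + 1) (tight && (i == digits.getD p 0)) (s + i)) 0 := by
  rfl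

lemma pvF_miss_eq (digits : List Int) (dp0 : List (List Int)) (prime : List Bool)
    (k p : Nat) (s : Int) (h : pvCell dp0 p s.toNat = -1) :
    pvF digits dp0 prime (k + 1) p false s
      = ((PySem.List.pyRange 0 10 1).map
          (fun i => pvF digits dp0 prime k (p + 1) false (s + i))).sum := by
  rw [pvF_succ_eq, if_neg (by simp [h])]
  simp only [Bool.false_eq_true, if_false, Bool.false_and]
  rw [pvFoldl_add_sum, zero_add]
  norm_num

lemma pvF_tight_split (digits : List Int) (dp0 : List (List Int)) (prime : List Bool)
    (k p : Nat) (s : Int) (hd0 : 0 ≤ digits.getD p 0) :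
    pvF digits dp0 prime (k + 1) p true s
      = ((PySem.List.pyRange 0 (digits.getD p 0) 1).map
          (fun i => pvF digits dp0 prime k (p + 1) false (s + i))).sum
        + pvF digits dp0 prime k (p + 1) true (s + digits.getD p 0) := by
  rw [pvF_succ_eq, if_neg (by simp), if_pos rfl,
      PySem.List.pyRange_one_succ_right hd0, List.foldl_append,
      pvFoldl_add_sum, pvFoldl_add_sum, zero_add]
  simp only [List.map_cons, List.map_nil, List.sum_cons, List.sum_nil, add_zero,
    beq_self_eq_true, Bool.and_true]
  congr 1
  congr 1
  apply List.map_congr_left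
  intro i hi
  rw [PySem.List.mem_pyRange_one] at hi
  have hne : (i == digits.getD p 0) = false := by rw [beq_eq_false_iff_ne]; omega
  rw [hne, Bool.and_false]

-- replacing the unique item with key k adds m·g k to the weight
lemma pvWt_replace (g : Int → Int) (l : List (Int × Int)) (k b m : Int)
    (hnd : (l.map Prod.fst).Nodup) (hmem : (k, b) ∈ l) :
    pvWt g (l.map (fun q => if q.1 == k then (k, b + m) else q)) = pvWt g l + m * g k := by
  induction l with
  | nil => simp at hmem
  | cons a t ih =>
    simp only [List.map_cons, List.nodup_cons] at hnd
    by_cases ha : a.1 = k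
    · have hb : a = (k, b) := by
        rcases List.mem_cons.mp hmem with h | h
        · exact h.symm
        · exfalso
          exact hnd.1 (by
            have : (k, b).1 ∈ t.map Prod.fst := List.mem_map_of_mem h
            simpa [ha] using this)
      have ht : t.map (fun q => if q.1 == k then (k, b + m) else q) = t := by
        have hcong : ∀ q ∈ t, (if q.1 == k then (k, b + m) else q) = id q := by
          intro q hq
          have : q.1 ≠ k := by
            intro hqk
            exact hnd.1 (by simpa [ha, hqk] using List.mem_map_of_mem (f := Prod.fst) hq)
          simp [this]
        rw [List.map_congr_left hcong, List.map_id]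
      simp only [List.map_cons, ha, beq_self_eq_true, if_pos, ht]
      unfold pvWt
      simp only [List.map_cons, List.sum_cons, hb]
      ring
    · have hmem' : (k, b) ∈ t := by
        rcases List.mem_cons.mp hmem with h | h
        · exact absurd (congrArg Prod.fst h.symm) ha
        · exact h
      have := ih hnd.2 hmem'
      simp only [List.map_cons, beq_eq_false_iff_ne.mpr ha, if_neg, Bool.false_eq_true,
        not_false_iff]
      unfold pvWt at this ⊢
      simp only [List.map_cons, List.sum_cons]
      omega

lemma pvWt_insert (g : Int → Int) (d : PySem.Dict Int Int) (hnd : d.keys.Nodup) (k m : Int) :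
    pvWt g ((d.insert k (d.getD k 0 + m)).items) = pvWt g d.items + m * g k := by
  by_cases hc : d.contains k = true
  · obtain ⟨v, hv⟩ : ∃ v, d.get? k = some v := by
      have := PySem.Dict.contains_eq_isSome_get? d k
      rw [hc] at this
      exact Option.isSome_iff_exists.mp this.symm
    rw [PySem.Dict.items_insert_of_contains d _ hc, PySem.Dict.getD_of_get?_eq_some d 0 hv]
    exact pvWt_replace g d.items k v m
      (by simpa [PySem.Dict.keys] using hnd)
      (PySem.Dict.mem_items_of_get?_eq_some d hv)
  · have hc' : d.contains k = false := by simpa using hc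
    rw [PySem.Dict.items_insert_of_not_contains d _ hc', PySem.Dict.getD_of_not_contains d 0 hc']
    unfold pvWt
    simp only [List.map_append, List.sum_append, List.map_cons, List.map_nil, List.sum_cons,
      List.sum_nil]
    ring

lemma pvWt_insert_fold (g : Int → Int) (key : Int → Int) (m : Int) (l : List Int) :
    ∀ (d : PySem.Dict Int Int), d.keys.Nodup →
    (l.foldl (fun nf i => nf.insert (key i) (nf.getD (key i) 0 + m)) d).keys.Nodup ∧
    (∀ x ∈ (l.foldl (fun nf i => nf.insert (key i) (nf.getD (key i) 0 + m)) d).keys,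
       x ∈ d.keys ∨ ∃ i ∈ l, x = key i) ∧
    pvWt g (l.foldl (fun nf i => nf.insert (key i) (nf.getD (key i) 0 + m)) d).items
      = pvWt g d.items + m * (l.map (fun i => g (key i))).sum := by
  induction l with
  | nil => intro d hnd; refine ⟨hnd, fun x hx => Or.inl hx, by simp⟩
  | cons i t ih =>
    intro d hnd
    simp only [List.foldl_cons]
    obtain ⟨h1, h2, h3⟩ := ih (d.insert (key i) (d.getD (key i) 0 + m))
      (PySem.Dict.nodup_keys_insert d _ _ hnd)
    refine ⟨h1, ?_, ?_⟩
    · intro x hx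
      rcases h2 x hx with hx' | ⟨j, hj, hxj⟩
      · rcases (PySem.Dict.mem_keys_insert d _ x _).mp hx' with h | h
        · exact Or.inr ⟨i, List.mem_cons_self .., h⟩
        · exact Or.inl h
      · exact Or.inr ⟨j, List.mem_cons_of_mem _ hj, hxj⟩
    · rw [h3, pvWt_insert g d hnd (key i) m]
      simp only [List.map_cons, List.sum_cons]
      ring

-- ===== A side =====
lemma pvSet2_nat (dp : List (List Int)) (pN sN : Nat) (v : Int) :
    pvSet2 dp (pN : Int) (sN : Int) v = dp.set pN ((dp.getD pN []).set sN v) := by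
  unfold pvSet2
  rw [if_pos ⟨Int.natCast_nonneg _, Int.natCast_nonneg _⟩]
  simp

lemma pvGetD_set_ne {α : Type} (l : List α) (i j : Nat) (a d : α) (h : j ≠ i) :
    (l.set i a).getD j d = l.getD j d := by
  simp only [List.getD, List.getElem?_set_ne (Ne.symm h)]

lemma pvGetD_set_self {α : Type} (l : List α) (i : Nat) (a d : α) (h : i < l.length) :
    (l.set i a).getD i d = a := by
  simp only [List.getD, List.getElem?_set_self h, Option.getD_some]

lemma pvCell_set (dp : List (List Int)) (pN sN : Nat) (v : Int) (p' s' : Nat) :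
    pvCell (dp.set pN ((dp.getD pN []).set sN v)) p' s'
      = if p' = pN ∧ s' = sN ∧ pN < dp.length ∧ sN < (dp.getD pN []).length then v
        else pvCell dp p' s' := by
  unfold pvCell
  by_cases hp : p' = pN
  · subst hp
    by_cases hlen : p' < dp.length
    · rw [pvGetD_set_self dp p' _ [] hlen]
      by_cases hs : s' = sN
      · subst hs
        by_cases hsl : s' < (dp.getD p' []).length
        · rw [pvGetD_set_self _ _ _ _ hsl, if_pos ⟨rfl, rfl, hlen, hsl⟩]
        · rw [List.set_eq_of_length_le (not_lt.mp hsl), if_neg (by tauto)]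
      · rw [pvGetD_set_ne _ _ _ _ _ hs, if_neg (by tauto)]
    · rw [List.set_eq_of_length_le (not_lt.mp hlen), if_neg (by tauto)]
  · rw [pvGetD_set_ne _ _ _ _ _ hp, if_neg (by tauto)]

lemma pvConsist_refl (digits : List Int) (dp0 : List (List Int)) (prime : List Bool) :
    pvConsist digits dp0 prime dp0 :=
  ⟨rfl, fun _ => rfl, fun _ _ => Or.inl rfl⟩

lemma pvConsist_set (digits : List Int) (dp0 : List (List Int)) (prime : List Bool)
    (dp : List (List Int)) (h : pvConsist digits dp0 prime dp) (pN sN : Nat) (v : Int)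
    (hc0 : pvCell dp0 pN sN = -1)
    (hv : v = pvF digits dp0 prime (digits.length - pN) pN false (sN : Int)) :
    pvConsist digits dp0 prime (pvSet2 dp (pN : Int) (sN : Int) v) := by
  obtain ⟨hlen, hrows, hcells⟩ := h
  rw [pvSet2_nat]
  refine ⟨by simpa using hlen, ?_, ?_⟩
  · intro j
    by_cases hj : j = pN
    · subst hj
      by_cases hin : j < dp.length
      · rw [pvGetD_set_self _ _ _ _ hin, List.length_set]
        exact hrows j
      · rw [List.set_eq_of_length_le (not_lt.mp hin)]
        exact hrows j
    · rw [pvGetD_set_ne _ _ _ _ _ hj]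
      exact hrows j
  · intro p' s'
    rw [pvCell_set]
    by_cases hps : p' = pN ∧ s' = sN ∧ pN < dp.length ∧ sN < (dp.getD pN []).length
    · rw [if_pos hps]
      obtain ⟨hp', hs', _, _⟩ := hps
      subst hp'; subst hs'
      exact Or.inr ⟨hc0, hv⟩
    · rw [if_neg hps]
      exact hcells p' s'

lemma pvConsist_setI (digits : List Int) (dp0 : List (List Int)) (prime : List Bool)
    (dp : List (List Int)) (h : pvConsist digits dp0 prime dp) (pN : Nat) (s : Int)
    (hs : 0 ≤ s) (v : Int) (hc0 : pvCell dp0 pN s.toNat = -1)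
    (hv : v = pvF digits dp0 prime (digits.length - pN) pN false s) :
    pvConsist digits dp0 prime (pvSet2 dp (pN : Int) s v) := by
  rw [show s = ((s.toNat : Nat) : Int) from (Int.toNat_of_nonneg hs).symm] at hv ⊢
  exact pvConsist_set digits dp0 prime dp h pN s.toNat v (by simpa using hc0) (by simpa using hv)

lemma pvFoldA_aux (digits : List Int) (dp0 : List (List Int)) (prime : List Bool)
    (fuel : Nat) (p : Nat) (tb : Bool) (dval s : Int) (k : Nat) (l : List Int)
    (H : ∀ (i : Int) (dp : List (List Int)), i ∈ l → pvConsist digits dp0 prime dp →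
      (pvGoA fuel ((p : Int) + 1) (tb && (i == dval)) (s + i) digits dp prime).1
        = pvF digits dp0 prime k (p + 1) (tb && (i == dval)) (s + i) ∧
      pvConsist digits dp0 prime
        (pvGoA fuel ((p : Int) + 1) (tb && (i == dval)) (s + i) digits dp prime).2) :
    ∀ (acc : Int) (dp : List (List Int)), pvConsist digits dp0 prime dp →
      (l.foldl (fun (acc : Int × List (List Int)) i =>
          let t := pvGoA fuel ((p : Int) + 1) (tb && (i == dval)) (s + i) digits acc.2 prime
          (acc.1 + t.1, t.2)) (acc, dp)).1
        = acc + (l.map (fun i => pvF digits dp0 prime k (p + 1) (tb && (i == dval)) (s + i))).sum ∧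
      pvConsist digits dp0 prime
        (l.foldl (fun (acc : Int × List (List Int)) i =>
          let t := pvGoA fuel ((p : Int) + 1) (tb && (i == dval)) (s + i) digits acc.2 prime
          (acc.1 + t.1, t.2)) (acc, dp)).2 := by
  induction l with
  | nil => intro acc dp hdp; exact ⟨by simp, hdp⟩
  | cons i t ih =>
    intro acc dp hdp
    simp only [List.foldl_cons, List.map_cons, List.sum_cons]
    obtain ⟨h1, h2⟩ := H i dp (List.mem_cons_self ..) hdp
    have := ih (fun j dpx hj => H j dpx (List.mem_cons_of_mem _ hj))
      (acc + (pvGoA fuel ((p : Int) + 1) (tb && (i == dval)) (s + i) digits dp prime).1)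
      (pvGoA fuel ((p : Int) + 1) (tb && (i == dval)) (s + i) digits dp prime).2 h2
    refine ⟨?_, this.2⟩
    rw [this.1, h1]
    ring

lemma pvGoA_main (digits : List Int) (dp0 : List (List Int)) (prime : List Bool) (Bnd : Nat)
    (hdig : ∀ d ∈ digits, 0 ≤ d ∧ d ≤ 9)
    (hprime : Bnd < prime.length)
    (hL : digits.length ≤ dp0.length)
    (hrows : ∀ row ∈ dp0, Bnd < row.length) :
    ∀ (fuel : Nat) (p : Nat) (tight : Bool) (s : Int) (dp : List (List Int)),
      p ≤ digits.length → digits.length - p < fuel → 0 ≤ s →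
      s.toNat + 9 * (digits.length - p) ≤ Bnd →
      pvConsist digits dp0 prime dp →
      (pvGoA fuel (p : Int) tight s digits dp prime).1
          = pvF digits dp0 prime (digits.length - p) p tight s ∧
      pvConsist digits dp0 prime (pvGoA fuel (p : Int) tight s digits dp prime).2 := by
  intro fuel
  induction fuel with
  | zero => intro p tight s dp hpL hfuel hs hBnd hcons; omega
  | succ fuel ih =>
    intro p tight s dp hpL hfuel hs hBnd hcons
    by_cases hpe : p = digits.length
    · subst hpe
      have hsp : s.toNat < prime.length := by omega
      simp only [pvGoA, if_pos rfl, Nat.sub_self]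
      refine ⟨?_, hcons⟩
      rw [PySem.List.pyGet?_eq_some_getElem prime hs (by omega)]
      show (if prime[s.toNat] then (1:Int) else 0) = pvF digits dp0 prime 0 digits.length tight s
      rw [show pvF digits dp0 prime 0 digits.length tight s
            = if prime.getD s.toNat false then 1 else 0 from rfl,
          List.getD_eq_getElem _ _ hsp]
    · have hplt : p < digits.length := by omega
      have hne : ¬((p : Int) = (digits.length : Int)) := by
        intro h; exact hpe (by exact_mod_cast h)
      obtain ⟨hlen, hrowlen, hcells⟩ := hcons
      have hpdp : p < dp.length := by omega
      have hrow0 : Bnd < (dp0.getD p []).length := by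
        have hmem : dp0.getD p [] ∈ dp0 := by
          rw [List.getD_eq_getElem _ _ (by omega)]; exact List.getElem_mem _
        exact hrows _ hmem
      have hrowdp : s.toNat < (dp.getD p []).length := by
        rw [hrowlen p]; omega
      have hdd : ((PySem.List.pyGet? digits (p : Int)).getD 0) = digits.getD p 0 := by
        rw [PySem.List.pyGet?_eq_some_getElem digits (by omega) (by exact_mod_cast hplt),
            List.getD_eq_getElem _ _ hplt]
        rfl
      have hddmem : digits.getD p 0 ∈ digits := by
        rw [List.getD_eq_getElem _ _ hplt]; exact List.getElem_mem _
      obtain ⟨hdd0, hdd9⟩ := hdig _ hddmem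
      have hk : digits.length - p = (digits.length - (p + 1)) + 1 := by omega
      have Hgen : ∀ (tb : Bool) (i : Int) (dpx : List (List Int)),
          i ∈ PySem.List.pyRange 0 (digits.getD p 0 + 1) 1 ∨ i ∈ PySem.List.pyRange 0 10 1 →
          pvConsist digits dp0 prime dpx →
          (pvGoA fuel ((p : Int) + 1) (tb && (i == digits.getD p 0)) (s + i) digits dpx prime).1
            = pvF digits dp0 prime (digits.length - (p + 1)) (p + 1) (tb && (i == digits.getD p 0)) (s + i) ∧
          pvConsist digits dp0 prime
            (pvGoA fuel ((p : Int) + 1) (tb && (i == digits.getD p 0)) (s + i) digits dpx prime).2 := by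
        intro tb i dpx hi hcx
        have hi09 : 0 ≤ i ∧ i ≤ 9 := by
          rcases hi with hi | hi <;> rw [PySem.List.mem_pyRange_one] at hi <;> omega
        have := ih (p + 1) (tb && (i == digits.getD p 0)) (s + i) dpx (by omega) (by omega)
          (by omega) (by omega) hcx
        rwa [show ((p + 1 : Nat) : Int) = (p : Int) + 1 by push_cast; ring] at this
      cases tight with
      | true =>
        simp only [pvGoA, if_neg hne, if_pos rfl, hdd, ite_true]
        obtain ⟨hf1, hf2⟩ := pvFoldA_aux digits dp0 prime fuel p true (digits.getD p 0) s
          (digits.length - (p + 1)) (PySem.List.pyRange 0 (digits.getD p 0 + 1) 1)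
          (fun i dpx hi hcx => Hgen true i dpx (Or.inl hi) hcx) 0 dp ⟨hlen, hrowlen, hcells⟩
        refine ⟨?_, hf2⟩
        rw [hf1, hk, pvF_succ_eq, if_neg (by simp), if_pos rfl, pvFoldl_add_sum]
      | false =>
        have hread : ((PySem.List.pyGet? dp (p : Int)).bind fun row => PySem.List.pyGet? row s)
            = some (pvCell dp p s.toNat) := pvRead_eq dp p s hpdp hs hrowdp
        by_cases hv : pvCell dp p s.toNat = -1
        · have hv0 : pvCell dp0 p s.toNat = -1 := by
            rcases hcells p s.toNat with h | h
            · rw [← h]; exact hv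
            · exact h.1
          simp only [pvGoA, if_neg hne, Bool.false_eq_true, if_false, hread, hv, ne_eq,
            not_true_eq_false, if_false, hdd, ite_false]
          obtain ⟨hf1, hf2⟩ := pvFoldA_aux digits dp0 prime fuel p false (digits.getD p 0) s
            (digits.length - (p + 1)) (PySem.List.pyRange 0 (9 + 1) 1)
            (fun i dpx hi hcx => Hgen false i dpx (Or.inr (by norm_num at hi ⊢; exact hi)) hcx)
            0 dp ⟨hlen, hrowlen, hcells⟩
          have hcount : (List.foldl (fun (acc : Int × List (List Int)) i =>
                (acc.1 + (pvGoA fuel ((p:Int) + 1) (false && (i == digits.getD p 0)) (s + i) digits acc.2 prime).1,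
                 (pvGoA fuel ((p:Int) + 1) (false && (i == digits.getD p 0)) (s + i) digits acc.2 prime).2))
                ((0 : Int), dp) (PySem.List.pyRange 0 (9 + 1) 1)).1
              = pvF digits dp0 prime (digits.length - p) p false s := by
            rw [hf1, hk, pvF_succ_eq, if_neg (by simp [hv0])]
            simp only [Bool.false_eq_true, if_false]
            rw [pvFoldl_add_sum]
          refine ⟨hcount, ?_⟩
          exact pvConsist_setI digits dp0 prime _ hf2 p s hs _ hv0 hcount
        · simp only [pvGoA, if_neg hne, Bool.false_eq_true, if_false, hread, hv, ne_eq,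
            not_false_eq_true, if_true]
          refine ⟨?_, ⟨hlen, hrowlen, hcells⟩⟩
          rcases hcells p s.toNat with h | h
          · rw [hk, pvF_cache_eq digits dp0 prime _ p s (by rw [← h]; exact hv), ← h]
          · rw [h.2, Int.toNat_of_nonneg hs]

-- ===== B side =====
lemma pvWt_cons (g : Int → Int) (sm : Int × Int) (l : List (Int × Int)) :
    pvWt g (sm :: l) = sm.2 * g sm.1 + pvWt g l := by
  unfold pvWt; simp

lemma pvHarvest (digits : List Int) (dp0 : List (List Int)) (prime : List Bool) (Bnd : Nat)
    (hprime : Bnd < prime.length) (P : Nat) :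
    ∀ (l : List (Int × Int)) (acc : Int), (∀ sm ∈ l, 0 ≤ sm.1 ∧ sm.1.toNat ≤ Bnd) →
      l.foldl (fun acc sm => if (PySem.List.pyGet? prime sm.1).getD false then acc + sm.2 else acc) acc
        = acc + pvWt (fun s' => pvF digits dp0 prime 0 P false s') l := by
  intro l
  induction l with
  | nil => intro acc _; simp [pvWt]
  | cons sm t ih =>
    intro acc hval
    obtain ⟨hs0, hsB⟩ := hval sm (List.mem_cons_self ..)
    simp only [List.foldl_cons]
    rw [ih _ (fun q hq => hval q (List.mem_cons_of_mem _ hq)), pvWt_cons]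
    rw [pvPrimeRead prime sm.1 hs0 (by omega)]
    show _ = acc + (sm.2 * (if prime.getD sm.1.toNat false then 1 else 0) + _)
    by_cases hb : prime.getD sm.1.toNat false
    · rw [if_pos hb, if_pos hb]; ring
    · rw [if_neg hb, if_neg hb]; ring

lemma pvInnerB_fold (digits : List Int) (dp0 : List (List Int)) (prime : List Bool) (Bnd : Nat)
    (hprime : Bnd < prime.length) (hL : digits.length ≤ dp0.length)
    (hrows : ∀ row ∈ dp0, Bnd < row.length)
    (k p : Nat) (hplt : p < digits.length) :
    ∀ (l : List (Int × Int)) (result : Int) (nf : PySem.Dict Int Int),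
      (∀ sm ∈ l, 0 ≤ sm.1 ∧ sm.1.toNat + 9 * (k + 1) ≤ Bnd) →
      nf.keys.Nodup → (∀ x ∈ nf.keys, 0 ≤ x ∧ x.toNat + 9 * k ≤ Bnd) →
      (l.foldl (pvInnerB dp0 (p : Int)) (result, nf)).2.keys.Nodup ∧
      (∀ x ∈ (l.foldl (pvInnerB dp0 (p : Int)) (result, nf)).2.keys, 0 ≤ x ∧ x.toNat + 9 * k ≤ Bnd) ∧
      (l.foldl (pvInnerB dp0 (p : Int)) (result, nf)).1
          + pvWt (pvF digits dp0 prime k (p + 1) false)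
              (l.foldl (pvInnerB dp0 (p : Int)) (result, nf)).2.items
        = result + pvWt (pvF digits dp0 prime k (p + 1) false) nf.items
          + pvWt (pvF digits dp0 prime (k + 1) p false) l := by
  intro l
  induction l with
  | nil => intro result nf _ hnd hvalid; exact ⟨hnd, hvalid, by simp [pvWt]⟩
  | cons sm t ih =>
    intro result nf hval hnd hvalid
    obtain ⟨hs0, hsB⟩ := hval sm (List.mem_cons_self ..)
    have hrow0 : Bnd < (dp0.getD p []).length := by
      have hmem : dp0.getD p [] ∈ dp0 := by
        rw [List.getD_eq_getElem _ _ (by omega)]; exact List.getElem_mem _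
      exact hrows _ hmem
    have hread : ((PySem.List.pyGet? dp0 (p : Int)).bind fun row => PySem.List.pyGet? row sm.1)
        = some (pvCell dp0 p sm.1.toNat) := pvRead_eq dp0 p sm.1 (by omega) hs0 (by omega)
    simp only [List.foldl_cons]
    by_cases hc : pvCell dp0 p sm.1.toNat = -1
    · have hstep : pvInnerB dp0 (p : Int) (result, nf) sm
          = (result, (PySem.List.pyRange 0 10 1).foldl
              (fun nf i => nf.insert (sm.1 + i) (nf.getD (sm.1 + i) 0 + sm.2)) nf) := by
        unfold pvInnerB
        rw [hread]
        simp [hc]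
      rw [hstep]
      obtain ⟨hnd', hmem', hwt'⟩ := pvWt_insert_fold (pvF digits dp0 prime k (p + 1) false)
        (fun i => sm.1 + i) sm.2 (PySem.List.pyRange 0 10 1) nf hnd
      have hvalid' : ∀ x ∈ ((PySem.List.pyRange 0 10 1).foldl
          (fun nf i => nf.insert (sm.1 + i) (nf.getD (sm.1 + i) 0 + sm.2)) nf).keys,
          0 ≤ x ∧ x.toNat + 9 * k ≤ Bnd := by
        intro x hx
        rcases hmem' x hx with hx' | ⟨i, hi, rfl⟩
        · exact hvalid x hx'
        · rw [PySem.List.mem_pyRange_one] at hi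
          constructor <;> omega
      obtain ⟨H1, H2, H3⟩ := ih result _ (fun q hq => hval q (List.mem_cons_of_mem _ hq)) hnd' hvalid'
      refine ⟨H1, H2, ?_⟩
      rw [H3, hwt', pvWt_cons, pvF_miss_eq digits dp0 prime k p sm.1 hc]
      ring
    · have hstep : pvInnerB dp0 (p : Int) (result, nf) sm = (result + sm.2 * pvCell dp0 p sm.1.toNat, nf) := by
        unfold pvInnerB
        rw [hread]
        simp [hc]
      rw [hstep]
      obtain ⟨H1, H2, H3⟩ := ih (result + sm.2 * pvCell dp0 p sm.1.toNat) nf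
        (fun q hq => hval q (List.mem_cons_of_mem _ hq)) hnd hvalid
      refine ⟨H1, H2, ?_⟩
      rw [H3, pvWt_cons, pvF_cache_eq digits dp0 prime k p sm.1 hc]
      ring

lemma pvLoopB_main (digits : List Int) (dp0 : List (List Int)) (prime : List Bool) (Bnd : Nat)
    (hdig : ∀ d ∈ digits, 0 ≤ d ∧ d ≤ 9) (hprime : Bnd < prime.length)
    (hL : digits.length ≤ dp0.length) (hrows : ∀ row ∈ dp0, Bnd < row.length) (tight : Bool) :
    ∀ (k p : Nat), p + k = digits.length →
    ∀ (result ts : Int) (free : PySem.Dict Int Int),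
      free.keys.Nodup →
      (∀ x ∈ free.keys, 0 ≤ x ∧ x.toNat + 9 * k ≤ Bnd) →
      (tight = true → 0 ≤ ts ∧ ts.toNat + 9 * k ≤ Bnd) →
      pvFinishB tight prime ((PySem.List.pyRange (p : Int) (digits.length : Int) 1).foldl
          (pvOuterB tight digits dp0) (result, free, ts))
        = result + pvWt (pvF digits dp0 prime k p false) free.items
          + (if tight then pvF digits dp0 prime k p true ts else 0) := by
  intro k
  induction k with
  | zero =>
    intro p hp result ts free hnd hvalid hts
    rw [PySem.List.pyRange_one_eq_nil (by omega), List.foldl_nil]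
    unfold pvFinishB
    have hharv := pvHarvest digits dp0 prime Bnd hprime p free.items result
      (fun sm hsm => by
        have := hvalid sm.1 (PySem.Dict.mem_keys_of_mem_items free hsm)
        omega)
    cases tight with
    | false => simpa using hharv
    | true =>
      obtain ⟨hts0, htsB⟩ := hts rfl
      show (free.items.foldl _ result) + _ = _
      rw [hharv, pvPrimeRead prime ts hts0 (by omega)]
      rfl
  | succ k ihk =>
    intro p hp result ts free hnd hvalid hts
    have hplt : p < digits.length := by omega
    rw [PySem.List.pyRange_one_cons (by exact_mod_cast hplt), List.foldl_cons]
    obtain ⟨H1, H2, H3⟩ := pvInnerB_fold digits dp0 prime Bnd hprime hL hrows k p hplt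
      free.items result PySem.Dict.empty
      (fun sm hsm => hvalid sm.1 (PySem.Dict.mem_keys_of_mem_items free hsm))
      PySem.Dict.nodup_keys_empty
      (by intro x hx; rw [PySem.Dict.keys_empty] at hx; cases hx)
    have hcast : ((p : Int) + 1) = ((p + 1 : Nat) : Int) := by push_cast; ring
    cases tight with
    | false =>
      have hout : pvOuterB false digits dp0 (result, free, ts) (p : Int)
          = ((free.items.foldl (pvInnerB dp0 (p : Int)) (result, PySem.Dict.empty)).1,
             (free.items.foldl (pvInnerB dp0 (p : Int)) (result, PySem.Dict.empty)).2, ts) := by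
        unfold pvOuterB; simp
      rw [hout, hcast, ihk (p + 1) (by omega) _ ts _ H1 H2 (by simp)]
      simp only [if_neg (by simp : ¬(false = true))] at *
      rw [show pvWt (pvF digits dp0 prime k (p+1) false)
            (PySem.Dict.empty : PySem.Dict Int Int).items = 0 from rfl] at H3
      omega
    | true =>
      obtain ⟨hts0, htsB⟩ := hts rfl
      have hdd : ((PySem.List.pyGet? digits (p : Int)).getD 0) = digits.getD p 0 := by
        rw [PySem.List.pyGet?_eq_some_getElem digits (by omega) (by exact_mod_cast hplt),
            List.getD_eq_getElem _ _ hplt]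
        rfl
      have hddmem : digits.getD p 0 ∈ digits := by
        rw [List.getD_eq_getElem _ _ hplt]; exact List.getElem_mem _
      obtain ⟨hdd0, hdd9⟩ := hdig _ hddmem
      obtain ⟨hnd2, hmem2, hwt2⟩ := pvWt_insert_fold (pvF digits dp0 prime k (p + 1) false)
        (fun i => ts + i) 1 (PySem.List.pyRange 0 (digits.getD p 0) 1)
        (free.items.foldl (pvInnerB dp0 (p : Int)) (result, PySem.Dict.empty)).2 H1
      have hout : pvOuterB true digits dp0 (result, free, ts) (p : Int)
          = ((free.items.foldl (pvInnerB dp0 (p : Int)) (result, PySem.Dict.empty)).1,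
             (PySem.List.pyRange 0 (digits.getD p 0) 1).foldl
               (fun nf i => nf.insert (ts + i) (nf.getD (ts + i) 0 + 1))
               (free.items.foldl (pvInnerB dp0 (p : Int)) (result, PySem.Dict.empty)).2,
             ts + digits.getD p 0) := by
        unfold pvOuterB; simp [hdd]
      have hvalid2 : ∀ x ∈ ((PySem.List.pyRange 0 (digits.getD p 0) 1).foldl
          (fun nf i => nf.insert (ts + i) (nf.getD (ts + i) 0 + 1))
          (free.items.foldl (pvInnerB dp0 (p : Int)) (result, PySem.Dict.empty)).2).keys,
          0 ≤ x ∧ x.toNat + 9 * k ≤ Bnd := by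
        intro x hx
        rcases hmem2 x hx with hx' | ⟨i, hi, rfl⟩
        · exact H2 x hx'
        · rw [PySem.List.mem_pyRange_one] at hi
          constructor <;> omega
      rw [hout, hcast, ihk (p + 1) (by omega) _ (ts + digits.getD p 0) _ hnd2 hvalid2
        (fun _ => ⟨by omega, by omega⟩)]
      rw [show pvWt (pvF digits dp0 prime k (p+1) false)
            (PySem.Dict.empty : PySem.Dict Int Int).items = 0 from rfl] at H3
      rw [if_pos rfl, if_pos rfl, hwt2,
          pvF_tight_split digits dp0 prime k p ts hdd0]
      omega

-- ===== corner regions of Pre_ =====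
lemma pvBase_eq (tight : Bool) (s : Int) (digits : List Int) (dp : List (List Int)) (prime : List Bool) :
    digit_dp (digits.length : Int) tight s digits dp prime
      = digit_dp_alt (digits.length : Int) tight s digits dp prime := by
  unfold digit_dp digit_dp_alt
  rw [PySem.List.pyRange_one_eq_nil (le_refl _)]
  simp only [List.foldl_nil]
  have hitems : ((PySem.Dict.empty : PySem.Dict Int Int).insert s 1).items = [(s, 1)] := by
    rw [PySem.Dict.items_insert_of_not_contains _ _ (by rfl)]
    rfl
  have hempty : (PySem.Dict.empty : PySem.Dict Int Int).items = [] := rfl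
  cases tight with
  | true =>
    simp only [pvGoA, if_pos rfl, List.foldl_nil]
    cases h : PySem.List.pyGet? prime s with
    | none => simp [pvFinishB, hempty, h]
    | some b => cases b <;> simp [pvFinishB, hempty, h]
  | false =>
    simp only [pvGoA, if_pos rfl, List.foldl_nil]
    cases h : PySem.List.pyGet? prime s with
    | none => simp [pvFinishB, hitems, h]
    | some b => cases b <;> simp [pvFinishB, hitems, h]

lemma pvCacheLoop (digits : List Int) (dp : List (List Int)) (ts : Int) :
    ∀ (l : List Int) (r : Int),
      l.foldl (pvOuterB false digits dp) (r, (PySem.Dict.empty : PySem.Dict Int Int), ts)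
        = (r, PySem.Dict.empty, ts) := by
  intro l
  induction l with
  | nil => intro r; rfl
  | cons p t ih => intro r; rw [List.foldl_cons, show pvOuterB false digits dp
      (r, (PySem.Dict.empty : PySem.Dict Int Int), ts) p = (r, PySem.Dict.empty, ts) from rfl, ih r]

lemma pvCache_eq (pos s : Int) (digits : List Int) (dp : List (List Int)) (prime : List Bool)
    (hlt : pos < (digits.length : Int)) (v : Int)
    (hc : ((PySem.List.pyGet? dp pos).bind fun row => PySem.List.pyGet? row s) = some v)
    (hv : v ≠ -1) :
    digit_dp pos false s digits dp prime = digit_dp_alt pos false s digits dp prime := by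
  unfold digit_dp digit_dp_alt
  have hne : ¬(pos = (digits.length : Int)) := by omega
  simp only [pvGoA, if_neg hne, Bool.false_eq_true, if_false, hc, hv, ne_eq, not_false_eq_true,
    if_true]
  rw [PySem.List.pyRange_one_cons hlt, List.foldl_cons]
  have hitems : ((PySem.Dict.empty : PySem.Dict Int Int).insert s 1).items = [(s, 1)] := by
    rw [PySem.Dict.items_insert_of_not_contains _ _ (by rfl)]
    rfl
  have hstep : pvOuterB false digits dp (0, (PySem.Dict.empty : PySem.Dict Int Int).insert s 1, s) pos
      = (0 + 1 * v, PySem.Dict.empty, s) := by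
    unfold pvOuterB pvInnerB
    simp only [hitems, List.foldl_cons, List.foldl_nil, hc, Option.getD_some, hv, ne_eq,
      not_false_eq_true, if_true, Bool.false_eq_true, if_false]
  rw [hstep, pvCacheLoop digits dp s _ _]
  show v = pvFinishB false prime (0 + 1 * v, PySem.Dict.empty, s)
  unfold pvFinishB
  simp [show (PySem.Dict.empty : PySem.Dict Int Int).items = ([] : List (Int × Int)) from rfl]

theorem digit_dp_spec : Claim_equal_digit_dp := by
  unfold Claim_equal_digit_dp
  intro pos tight s digits dp prime _ hpre
  unfold Spec_digit_dp
  rcases hpre with ⟨hbase, _⟩ | ⟨hlt, htf, hc, hcv⟩ | ⟨h0, h1, h2, hdig, hpr, hdp⟩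
  · rw [hbase]
    exact pvBase_eq tight s digits dp prime
  · subst htf
    cases hcx : ((PySem.List.pyGet? dp pos).bind fun row => PySem.List.pyGet? row s) with
    | none => exact absurd hcx hc
    | some v =>
      rw [hcx] at hcv
      exact pvCache_eq pos s digits dp prime hlt v hcx (by intro h; exact hcv (by rw [h]))
  · by_cases hpe : pos = (digits.length : Int)
    · rw [hpe]
      exact pvBase_eq tight s digits dp prime
    · unfold digit_dp digit_dp_alt
      have hplt : pos < (digits.length : Int) := lt_of_le_of_ne h1 hpe
      obtain ⟨hdpl, hdprow⟩ := hdp hplt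
      obtain ⟨pN, rfl⟩ : ∃ pN : Nat, pos = (pN : Int) := ⟨pos.toNat, (Int.toNat_of_nonneg h0).symm⟩
      have hpN : pN < digits.length := by exact_mod_cast hplt
      have hprime : s.toNat + 9 * (digits.length - pN) < prime.length := by omega
      have hLdp : digits.length ≤ dp.length := by exact_mod_cast hdpl
      have hrows : ∀ row ∈ dp, s.toNat + 9 * (digits.length - pN) < row.length := by
        intro row hr
        have := hdprow row hr
        omega
      have hA := (pvGoA_main digits dp prime (s.toNat + 9 * (digits.length - pN)) hdig hprime hLdp
        hrows (digits.length + 1) pN tight s dp (by omega) (by omega) h2 (by omega)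
        (pvConsist_refl digits dp prime)).1
      rw [hA]
      cases tight with
      | true =>
        rw [show (if (true : Bool) then (PySem.Dict.empty : PySem.Dict Int Int)
              else PySem.Dict.empty.insert s 1) = PySem.Dict.empty from rfl]
        rw [pvLoopB_main digits dp prime (s.toNat + 9 * (digits.length - pN)) hdig hprime hLdp hrows
          true (digits.length - pN) pN (by omega) 0 s PySem.Dict.empty PySem.Dict.nodup_keys_empty
          (by intro x hx; rw [PySem.Dict.keys_empty] at hx; cases hx)
          (fun _ => ⟨h2, by omega⟩)]
        rw [show pvWt (pvF digits dp prime (digits.length - pN) pN false)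
              (PySem.Dict.empty : PySem.Dict Int Int).items = 0 from rfl]
        simp
      | false =>
        rw [show (if (false : Bool) then (PySem.Dict.empty : PySem.Dict Int Int)
              else PySem.Dict.empty.insert s 1) = PySem.Dict.empty.insert s 1 from rfl]
        have hnd : ((PySem.Dict.empty : PySem.Dict Int Int).insert s 1).keys.Nodup :=
          PySem.Dict.nodup_keys_insert _ _ _ PySem.Dict.nodup_keys_empty
        have hvalid : ∀ x ∈ ((PySem.Dict.empty : PySem.Dict Int Int).insert s 1).keys,
            0 ≤ x ∧ x.toNat + 9 * (digits.length - pN) ≤ s.toNat + 9 * (digits.length - pN) := by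
          intro x hx
          rcases (PySem.Dict.mem_keys_insert _ _ _ _).mp hx with rfl | hx'
          · exact ⟨h2, by omega⟩
          · rw [PySem.Dict.keys_empty] at hx'; cases hx'
        rw [pvLoopB_main digits dp prime (s.toNat + 9 * (digits.length - pN)) hdig hprime hLdp hrows
          false (digits.length - pN) pN (by omega) 0 s _ hnd hvalid (by simp)]
        have hitems : ((PySem.Dict.empty : PySem.Dict Int Int).insert s 1).items = [(s, 1)] := by
          rw [PySem.Dict.items_insert_of_not_contains _ _ (by rfl)]
          rfl
        rw [hitems, pvWt_cons]
        show _ = 0 + (1 * pvF digits dp prime (digits.length - pN) pN false s + pvWt _ []) + 0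
        rw [show pvWt (pvF digits dp prime (digits.length - pN) pN false) [] = 0 from rfl]
        ring
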